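-- pv_equiv track=rewrite | github.com/ayukyo/alltoolkit | Python/glob_pattern_utils/mod.py | is_glob
-- ===== SOURCE A (Python) =====
-- def is_glob(pattern: str) -> bool:
--     """
--     Check if a pattern contains glob special characters.
--
--     Args:
--         pattern: The pattern to check
--
--     Returns:
--         True if the pattern contains glob metacharacters, False otherwise
--
--     Example:
--         >>> is_glob("*.txt")
--         True
--         >>> is_glob("file.txt")
--         False
--     """
--     special_chars = set('*?[]{}')
--     i = 0
--     while i < len(pattern):
--         if pattern[i] == '\\' and i + 1 < len(pattern):
--             i += 2
--             continue
--         if pattern[i] in special_chars: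
--             return True
--         i += 1
--     return False
-- ===== SOURCE B (Python) =====
-- def is_glob(pattern: str) -> bool:
--     # One forward pass with a skip flag: drop each backslash-escaped pair,
--     # collect the remaining characters, then test them against the metacharacters.
--     skip = False
--     stripped = []
--     for c in pattern:
--         if skip:
--             skip = False
--         elif c == '\\':
--             skip = True
--         else:
--             stripped.append(c)
--     return any(c in '*?[]{}' for c in stripped)
-- ===== Notes on version B (the rewrite author's own statement) =====
-- stated objective: idiomatic
-- what changed: Replaced the index-jumping while loop with early return by a skip-flag fold that strips escaped pairs into a list, followed by a separate any() scan for metacharacters.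
import Mathlib
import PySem

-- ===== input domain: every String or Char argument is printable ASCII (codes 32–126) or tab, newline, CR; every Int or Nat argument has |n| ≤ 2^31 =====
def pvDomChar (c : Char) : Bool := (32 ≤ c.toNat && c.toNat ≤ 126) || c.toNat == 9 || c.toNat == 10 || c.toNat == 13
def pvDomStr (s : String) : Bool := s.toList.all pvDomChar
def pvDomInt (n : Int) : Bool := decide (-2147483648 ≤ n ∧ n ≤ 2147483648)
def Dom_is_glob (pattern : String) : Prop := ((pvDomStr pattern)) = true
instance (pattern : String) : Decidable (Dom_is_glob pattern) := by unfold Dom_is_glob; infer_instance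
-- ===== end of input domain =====

-- B replaces A's index-jumping while loop (with early return) by a skip-flag fold that
-- strips escaped pairs, then a separate scan for metacharacters (objective: idiomatic).

-- ===== PORT A =====
-- special_chars = set('*?[]{}')
def specialChars : PySem.Set Char := PySem.Set.ofList "*?[]{}".toList

-- the while loop over the index i
def isGlobLoop (s : List Char) (i : Nat) : Bool :=
  if h : i < s.length then
    if s[i] = '\\' ∧ i + 1 < s.length then isGlobLoop s (i + 2)
    else if s[i] ∈ specialChars then true
    else isGlobLoop s (i + 1)
  else false
termination_by s.length - i

def is_glob (pattern : String) : Bool := isGlobLoop pattern.toList 0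

-- ===== PORT B =====
-- one step of the for loop: state = (skip, stripped)
def stripStep : Bool × List Char → Char → Bool × List Char
  | (true, acc), _ => (false, acc)
  | (false, acc), c => if c = '\\' then (true, acc) else (false, acc ++ [c])

def is_glob_alt (pattern : String) : Bool :=
  ((pattern.toList.foldl stripStep (false, [])).2).any (fun c => c ∈ "*?[]{}".toList)

-- ===== PRECONDITION & SPEC =====
def Spec_is_glob (pattern : String) (out : Bool) : Prop := out = is_glob_alt pattern
instance (pattern : String) (out : Bool) : Decidable (Spec_is_glob pattern out) := by unfold Spec_is_glob; infer_instance

-- ===== CLAIM (what is proved, stated in full; the proofs are below) =====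
def Claim_equal_is_glob : Prop := ∀ (pattern : String), Dom_is_glob pattern → Spec_is_glob pattern (is_glob pattern)

-- ===== LEMMAS AND PROOFS =====

-- the list of characters remaining after removing each backslash-escaped pair
def stripL : List Char → List Char
  | [] => []
  | [a] => if a = '\\' then [] else [a]
  | a :: b :: rest => if a = '\\' then stripL rest else a :: stripL (b :: rest)

lemma stripL_cons_ne (a : Char) (l : List Char) (h : a ≠ '\\') :
    stripL (a :: l) = a :: stripL l := by
  cases l <;> simp [stripL, h]

lemma specialChars_eq : specialChars = "*?[]{}".toList := by decide

lemma foldl_stripStep (l : List Char) :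
    ∀ acc, (l.foldl stripStep (false, acc)).2 = acc ++ stripL l := by
  induction l using stripL.induct with
  | case1 => simp [stripL]
  | case2 => intro acc; simp [stripL, stripStep]
  | case3 a h => intro acc; simp [stripL, stripStep, h]
  | case4 b rest ih =>
      intro acc
      rw [List.foldl_cons, List.foldl_cons,
        show stripStep (false, acc) '\\' = (true, acc) by simp [stripStep],
        show stripStep (true, acc) b = (false, acc) from rfl, ih acc]
      simp [stripL]
  | case5 a b rest h ih =>
      intro acc
      rw [List.foldl_cons,
        show stripStep (false, acc) a = (false, acc ++ [a]) by simp [stripStep, h],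
        ih (acc ++ [a]), stripL_cons_ne _ _ h]
      simp

lemma loop_eq_stripL (s : List Char) (i : Nat) :
    isGlobLoop s i = (stripL (s.drop i)).any (fun c => c ∈ specialChars) := by
  induction i using isGlobLoop.induct (s := s) with
  | case1 i h hc ih =>
      rw [isGlobLoop, dif_pos h, if_pos hc, ih]
      rw [List.drop_eq_getElem_cons h, List.drop_eq_getElem_cons hc.2]
      simp [stripL, hc.1]
  | case2 i h hc hmem =>
      rw [isGlobLoop, dif_pos h, if_neg hc, if_pos hmem]
      have hne : s[i] ≠ '\\' := by
        intro he; rw [he] at hmem; exact absurd hmem (by decide)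
      rw [List.drop_eq_getElem_cons h, stripL_cons_ne _ _ hne]
      simp [hmem]
  | case3 i h hc hmem ih =>
      rw [isGlobLoop, dif_pos h, if_neg hc, if_neg hmem, ih]
      rw [List.drop_eq_getElem_cons h]
      by_cases hne : s[i] = '\\'
      · have hlen : ¬ i + 1 < s.length := fun hl => hc ⟨hne, hl⟩
        have : s.drop (i + 1) = [] := List.drop_eq_nil_of_le (by omega)
        rw [this, hne]
        simp [stripL]
      · rw [stripL_cons_ne _ _ hne]
        simp [hmem]
  | case4 i h => simp [isGlobLoop, h, List.drop_eq_nil_of_le (by omega : s.length ≤ i), stripL]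

-- ===== VERDICT (by name: the statement is the Claim_ definition above) =====
theorem is_glob_spec : Claim_equal_is_glob := by
  intro pattern _
  unfold Spec_is_glob is_glob is_glob_alt
  rw [loop_eq_stripL, foldl_stripStep, List.nil_append, specialChars_eq, List.drop_zero]
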